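-- pv_equiv track=rewrite | github.com/loomlabs-dev/loom | src/loom/cli_scope.py | _matched_scope_tokens
-- ===== SOURCE A (Python) =====
-- def _matched_scope_tokens(
--     description_tokens: tuple[str, ...],
--     candidate_tokens: tuple[str, ...],
-- ) -> tuple[str, ...]:
--     matched: list[str] = []
--     candidate_set = set(candidate_tokens)
--     for token in description_tokens:
--         if token in candidate_set:
--             matched.append(token)
--             continue
--         for candidate in candidate_set:
--             if len(token) >= 4 and len(candidate) >= 4 and (
--                 token.startswith(candidate) or candidate.startswith(token)
--             ):
--                 matched.append(token)
--                 break
--     return tuple(dict.fromkeys(matched))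
-- ===== SOURCE B (Python) =====
-- def _matched_scope_tokens(
--     description_tokens: tuple[str, ...],
--     candidate_tokens: tuple[str, ...],
-- ) -> tuple[str, ...]:
--     candidate_set = set(candidate_tokens)
--     # All prefixes (length >= 4) of candidates of length >= 4: one pass over the
--     # candidates replaces A's per-token scan of the whole candidate set.
--     prefixes = {
--         c[:k]
--         for c in candidate_set
--         if len(c) >= 4
--         for k in range(4, len(c) + 1)
--     }
--     seen = set()
--     matched: list[str] = []
--     for token in description_tokens:
--         if token in seen:
--             continue
--         if token in candidate_set or (
--             len(token) >= 4
--             and (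
--                 token in prefixes
--                 or any(token[:k] in candidate_set for k in range(4, len(token) + 1))
--             )
--         ):
--             seen.add(token)
--             matched.append(token)
--     return tuple(matched)
-- ===== Notes on version B (the rewrite author's own statement) =====
-- stated objective: faster
-- what changed: Replaces A's per-token scan over the whole candidate set with a precomputed set of all length>=4 candidate prefixes plus set lookups of the token's own prefixes, and dedups on the fly with a seen-set instead of a final dict.fromkeys pass.
import Mathlib
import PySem

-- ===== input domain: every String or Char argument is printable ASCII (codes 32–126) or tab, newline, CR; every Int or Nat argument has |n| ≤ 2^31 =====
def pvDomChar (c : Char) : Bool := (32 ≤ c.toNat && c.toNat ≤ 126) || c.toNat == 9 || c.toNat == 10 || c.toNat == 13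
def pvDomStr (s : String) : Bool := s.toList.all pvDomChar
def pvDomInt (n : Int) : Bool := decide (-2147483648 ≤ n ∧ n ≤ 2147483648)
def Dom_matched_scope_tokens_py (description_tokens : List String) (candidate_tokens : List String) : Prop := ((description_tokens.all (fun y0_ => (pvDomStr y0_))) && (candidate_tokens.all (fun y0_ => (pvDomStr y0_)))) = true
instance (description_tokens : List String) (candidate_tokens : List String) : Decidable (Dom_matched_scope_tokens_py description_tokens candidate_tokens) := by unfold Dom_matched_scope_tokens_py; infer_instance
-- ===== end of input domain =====

-- B precomputes the set of all length>=4 prefixes of the candidates and tests each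
-- description token by set lookups of its own prefixes (with an on-the-fly seen-set
-- dedup) instead of A's per-token scan over the whole candidate set.


-- ===== PORT A =====
-- A's inner 'for candidate in candidate_set: … break' loop (the break only appends
-- token, so the result does not depend on the set's iteration order)
def pvInnerA (m : List String) (token : String) : List String → List String
  | [] => m
  | c :: rest =>
    if (decide (4 ≤ PySem.Str.len token) && decide (4 ≤ PySem.Str.len c)
        && (PySem.Str.startswith token c || PySem.Str.startswith c token)) = true then
      m ++ [token]
    else pvInnerA m token rest

def matched_scope_tokens_py (description_tokens : List String) (candidate_tokens : List String) : List String :=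
  let candidate_set : PySem.Set String := PySem.Set.ofList candidate_tokens
  let matched : List String := description_tokens.foldl
    (fun m token =>
      if PySem.Set.contains candidate_set token then m ++ [token]
      else pvInnerA m token candidate_set) []
  PySem.List.dedup matched

-- ===== PORT B =====
-- the set comprehension building 'prefixes' in Source B
def pvPrefixes (candidate_set : PySem.Set String) : PySem.Set String :=
  candidate_set.foldl
    (fun s c =>
      if 4 ≤ PySem.Str.len c then
        (PySem.List.pyRange 4 (PySem.Str.len c + 1) 1).foldl
          (fun s k => PySem.Set.add s (PySem.Str.slice c none (some k))) s
      else s)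
    PySem.Set.empty

-- the condition of Source B's 'if token in candidate_set or (…)'
def pvCondB (candidate_set prefixes : PySem.Set String) (token : String) : Bool :=
  PySem.Set.contains candidate_set token ||
    (decide (4 ≤ PySem.Str.len token) &&
      (PySem.Set.contains prefixes token ||
        (PySem.List.pyRange 4 (PySem.Str.len token + 1) 1).any
          (fun k => PySem.Set.contains candidate_set (PySem.Str.slice token none (some k)))))

def matched_scope_tokens_py_alt (description_tokens : List String) (candidate_tokens : List String) : List String :=
  let candidate_set : PySem.Set String := PySem.Set.ofList candidate_tokens
  let prefixes : PySem.Set String := pvPrefixes candidate_set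
  (description_tokens.foldl
    (fun (st : PySem.Set String × List String) token =>
      if PySem.Set.contains st.1 token then st
      else if pvCondB candidate_set prefixes token then (PySem.Set.add st.1 token, st.2 ++ [token])
      else st)
    (PySem.Set.empty, [])).2

-- ===== PRECONDITION & SPEC =====
def Spec_matched_scope_tokens_py (description_tokens : List String) (candidate_tokens : List String) (out : List String) : Prop := out = matched_scope_tokens_py_alt description_tokens candidate_tokens
instance (description_tokens : List String) (candidate_tokens : List String) (out : List String) : Decidable (Spec_matched_scope_tokens_py description_tokens candidate_tokens out) := by unfold Spec_matched_scope_tokens_py; infer_instance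

-- ===== CLAIM (what is proved, stated in full; the proofs are below) =====
def Claim_equal_matched_scope_tokens_py : Prop := ∀ (description_tokens : List String) (candidate_tokens : List String), Dom_matched_scope_tokens_py description_tokens candidate_tokens → Spec_matched_scope_tokens_py description_tokens candidate_tokens (matched_scope_tokens_py description_tokens candidate_tokens)

-- ===== LEMMAS AND PROOFS =====

-- A's per-candidate test as a named Bool predicate (definitionally the condition in pvInnerA)
def pvGA (token c : String) : Bool :=
  decide (4 ≤ PySem.Str.len token) && decide (4 ≤ PySem.Str.len c)
    && (PySem.Str.startswith token c || PySem.Str.startswith c token)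

lemma pvContainsMem (s : PySem.Set String) (x : String) :
    PySem.Set.contains s x = true ↔ x ∈ s := by
  simp [PySem.Set.contains]

lemma pvInnerA_eq (m : List String) (token : String) (cs : List String) :
    pvInnerA m token cs = if cs.any (pvGA token) then m ++ [token] else m := by
  induction cs with
  | nil => simp [pvInnerA]
  | cons c rest ih =>
    have hc : pvInnerA m token (c :: rest)
        = if pvGA token c = true then m ++ [token] else pvInnerA m token rest := rfl
    rw [hc, List.any_cons, ih]
    cases h : pvGA token c <;> simp

lemma pvA_eq (dts cts : List String) :
    matched_scope_tokens_py dts cts =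
      PySem.List.dedup (dts.filter
        (fun t => PySem.Set.contains (PySem.Set.ofList cts) t
          || (PySem.Set.ofList cts).any (pvGA t))) := by
  have hstep : (fun (m : List String) token =>
      if PySem.Set.contains (PySem.Set.ofList cts) token then m ++ [token]
      else pvInnerA m token (PySem.Set.ofList cts))
      = fun m token =>
        if (PySem.Set.contains (PySem.Set.ofList cts) token
            || (PySem.Set.ofList cts).any (pvGA token)) = true then m ++ [token] else m := by
    funext m token
    rw [pvInnerA_eq]
    cases hcm : PySem.Set.contains (PySem.Set.ofList cts) token <;> simp
  simp only [matched_scope_tokens_py]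
  rw [hstep, PySem.List.foldl_append_if
    (fun t => PySem.Set.contains (PySem.Set.ofList cts) t || (PySem.Set.ofList cts).any (pvGA t))
    (fun x => x)]
  simp

lemma pvBpair (p : String → Bool) (dts : List String) (s : List String) :
    dts.foldl
      (fun (st : PySem.Set String × List String) token =>
        if PySem.Set.contains st.1 token then st
        else if p token then (PySem.Set.add st.1 token, st.2 ++ [token])
        else st) (s, s)
    = (dts.foldl (fun o t => if p t then PySem.Set.add o t else o) s,
       dts.foldl (fun o t => if p t then PySem.Set.add o t else o) s) := by
  induction dts generalizing s with
  | nil => rfl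
  | cons a rest ih =>
    by_cases h : PySem.Set.contains s a = true
    · have hm : a ∈ s := (pvContainsMem s a).mp h
      have hadd : PySem.Set.add s a = s := by
        simp [PySem.Set.add, hm]
      simpa [hm, hadd] using ih s
    · have hm : a ∉ s := fun hmem => h ((pvContainsMem s a).mpr hmem)
      have hadd : PySem.Set.add s a = s ++ [a] := by
        simp [PySem.Set.add, hm]
      by_cases hp : p a = true
      · simpa [hm, hp, hadd] using ih (s ++ [a])
      · simpa [hm, hp] using ih s

lemma pvB_eq (dts cts : List String) :
    matched_scope_tokens_py_alt dts cts =
      PySem.List.dedup (dts.filter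
        (pvCondB (PySem.Set.ofList cts) (pvPrefixes (PySem.Set.ofList cts)))) := by
  simp only [matched_scope_tokens_py_alt]
  rw [show (PySem.Set.empty : PySem.Set String) = ([] : List String) from rfl, pvBpair]
  rw [PySem.List.dedup_eq_ofList,
    PySem.Set.ofList_eq_foldl
      (dts.filter (pvCondB (PySem.Set.ofList cts) (pvPrefixes (PySem.Set.ofList cts)))),
    List.foldl_filter]

lemma pvMemFoldlAdd (l : List Int) (f : Int → String) (s : List String) (x : String) :
    (x ∈ l.foldl (fun s b => PySem.Set.add s (f b)) s) ↔ x ∈ s ∨ ∃ b ∈ l, x = f b := by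
  induction l generalizing s with
  | nil => simp
  | cons a rest ih =>
    rw [List.foldl_cons, ih]
    simp only [PySem.Set.mem_add, List.mem_cons]
    constructor
    · rintro ((h | h) | ⟨b, hb, rfl⟩)
      · exact Or.inl h
      · exact Or.inr ⟨a, Or.inl rfl, h⟩
      · exact Or.inr ⟨b, Or.inr hb, rfl⟩
    · rintro (h | ⟨b, (rfl | hb), h⟩)
      · exact Or.inl (Or.inl h)
      · exact Or.inl (Or.inr h)
      · exact Or.inr ⟨b, hb, h⟩

lemma pvMemPrefixesAux (cs : List String) (s : List String) (t : String) :
    (t ∈ cs.foldl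
      (fun s c =>
        if 4 ≤ PySem.Str.len c then
          (PySem.List.pyRange 4 (PySem.Str.len c + 1) 1).foldl
            (fun s k => PySem.Set.add s (PySem.Str.slice c none (some k))) s
        else s) s)
      ↔ t ∈ s ∨ ∃ c ∈ cs, 4 ≤ PySem.Str.len c ∧
          ∃ k : Int, 4 ≤ k ∧ k < PySem.Str.len c + 1 ∧ t = PySem.Str.slice c none (some k) := by
  induction cs generalizing s with
  | nil => simp
  | cons a rest ih =>
    rw [List.foldl_cons, ih]
    by_cases ha : 4 ≤ PySem.Str.len a
    · rw [if_pos ha, pvMemFoldlAdd]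
      simp only [PySem.List.mem_pyRange_one, List.mem_cons]
      constructor
      · rintro ((h | ⟨k, ⟨hk1, hk2⟩, rfl⟩) | ⟨c, hc, h⟩)
        · exact Or.inl h
        · exact Or.inr ⟨a, Or.inl rfl, ha, k, hk1, hk2, rfl⟩
        · exact Or.inr ⟨c, Or.inr hc, h⟩
      · rintro (h | ⟨c, (rfl | hc), h4, k, hk1, hk2, hk3⟩)
        · exact Or.inl (Or.inl h)
        · exact Or.inl (Or.inr ⟨k, ⟨hk1, hk2⟩, hk3⟩)
        · exact Or.inr ⟨c, hc, h4, k, hk1, hk2, hk3⟩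
    · rw [if_neg ha]
      constructor
      · rintro (h | ⟨c, hc, h⟩)
        · exact Or.inl h
        · exact Or.inr ⟨c, List.mem_cons_of_mem _ hc, h⟩
      · rintro (h | ⟨c, hc, h4, hk⟩)
        · exact Or.inl h
        · rcases List.mem_cons.mp hc with rfl | hc'
          · exact absurd h4 ha
          · exact Or.inr ⟨c, hc', h4, hk⟩

lemma pvSliceToList (c : String) (k : Int) (h0 : 0 ≤ k) :
    (PySem.Str.slice c none (some k)).toList = c.toList.take k.toNat := by
  rw [PySem.Str.toList_slice, PySem.Chars.slice_eq_listSlice, PySem.List.slice_to _ h0]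

lemma pvPrefixChar (t c : String) :
    (∃ k : Int, 4 ≤ k ∧ k < PySem.Str.len c + 1 ∧ t = PySem.Str.slice c none (some k))
      ↔ (4 ≤ PySem.Str.len t ∧ t.toList <+: c.toList) := by
  simp only [PySem.Str.len_eq]
  constructor
  · rintro ⟨k, hk4, hklt, rfl⟩
    have h0 : (0:Int) ≤ k := by omega
    rw [pvSliceToList _ _ h0]
    have hkn : k.toNat ≤ c.toList.length := by omega
    constructor
    · rw [List.length_take]
      push_cast
      omega
    · exact List.take_prefix _ _
  · rintro ⟨h4, hpre⟩
    have hle := hpre.length_le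
    refine ⟨(t.toList.length : Int), h4, by omega, ?_⟩
    have hsl : (PySem.Str.slice c none (some (t.toList.length : Int))).toList
        = c.toList.take t.toList.length := by
      rw [pvSliceToList _ _ (Int.natCast_nonneg _)]
      simp
    rw [← String.toList_inj, hsl]
    exact List.prefix_iff_eq_take.mp hpre

lemma pvMemPrefixesChar (cs : List String) (t : String) :
    t ∈ pvPrefixes cs ↔
      ∃ c ∈ cs, 4 ≤ PySem.Str.len c ∧ 4 ≤ PySem.Str.len t ∧ t.toList <+: c.toList := by
  have h := pvMemPrefixesAux cs PySem.Set.empty t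
  simp only [pvPrefixes]
  rw [h]
  simp only [show (t ∈ (PySem.Set.empty : PySem.Set String)) ↔ False by simp [PySem.Set.empty],
    false_or]
  constructor
  · rintro ⟨c, hc, hc4, hk⟩
    have h2 := (pvPrefixChar t c).mp hk
    exact ⟨c, hc, hc4, h2.1, h2.2⟩
  · rintro ⟨c, hc, hc4, h4, hpre⟩
    exact ⟨c, hc, hc4, (pvPrefixChar t c).mpr ⟨h4, hpre⟩⟩

lemma pvAnyGA (cs : List String) (t : String) :
    cs.any (pvGA t) = true ↔
      4 ≤ PySem.Str.len t ∧ ∃ c ∈ cs, 4 ≤ PySem.Str.len c ∧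
        (c.toList <+: t.toList ∨ t.toList <+: c.toList) := by
  rw [List.any_eq_true]
  constructor
  · rintro ⟨c, hc, hg⟩
    simp only [pvGA, Bool.and_eq_true, Bool.or_eq_true, decide_eq_true_eq,
      PySem.Str.startswith_eq, PySem.Chars.startswith_iff] at hg
    exact ⟨hg.1.1, c, hc, hg.1.2, hg.2⟩
  · rintro ⟨h4, c, hc, hc4, hor⟩
    refine ⟨c, hc, ?_⟩
    simp only [pvGA, Bool.and_eq_true, Bool.or_eq_true, decide_eq_true_eq,
      PySem.Str.startswith_eq, PySem.Chars.startswith_iff]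
    exact ⟨⟨h4, hc4⟩, hor⟩

lemma pvAnyK (cs : List String) (t : String) :
    ((PySem.List.pyRange 4 (PySem.Str.len t + 1) 1).any
        (fun k => PySem.Set.contains cs (PySem.Str.slice t none (some k))) = true)
      ↔ ∃ c ∈ cs, 4 ≤ PySem.Str.len c ∧ c.toList <+: t.toList := by
  rw [List.any_eq_true]
  constructor
  · rintro ⟨k, hk, hc⟩
    rw [PySem.List.mem_pyRange_one] at hk
    rw [pvContainsMem] at hc
    have h2 := (pvPrefixChar (PySem.Str.slice t none (some k)) t).mp ⟨k, hk.1, hk.2, rfl⟩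
    exact ⟨_, hc, h2.1, h2.2⟩
  · rintro ⟨c, hc, hc4, hpre⟩
    obtain ⟨k, hk4, hklt, hceq⟩ := (pvPrefixChar c t).mpr ⟨hc4, hpre⟩
    exact ⟨k, PySem.List.mem_pyRange_one.mpr ⟨hk4, hklt⟩,
      (pvContainsMem _ _).mpr (hceq ▸ hc)⟩

lemma pvPointwise (cs : List String) (t : String) :
    (PySem.Set.contains cs t || cs.any (pvGA t))
      = pvCondB cs (pvPrefixes cs) t := by
  rw [Bool.eq_iff_iff]
  simp only [pvCondB, Bool.or_eq_true, Bool.and_eq_true, decide_eq_true_eq]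
  rw [pvAnyGA, pvAnyK]
  simp only [pvContainsMem]
  rw [pvMemPrefixesChar]
  constructor
  · rintro (h | ⟨h4, c, hc, hc4, (hor | hor)⟩)
    · exact Or.inl h
    · exact Or.inr ⟨h4, Or.inr ⟨c, hc, hc4, hor⟩⟩
    · exact Or.inr ⟨h4, Or.inl ⟨c, hc, hc4, h4, hor⟩⟩
  · rintro (h | ⟨h4, (⟨c, hc, hc4, _, hpre⟩ | ⟨c, hc, hc4, hpre⟩)⟩)
    · exact Or.inl h
    · exact Or.inr ⟨h4, c, hc, hc4, Or.inr hpre⟩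
    · exact Or.inr ⟨h4, c, hc, hc4, Or.inl hpre⟩

-- ===== VERDICT (by name: the statement is the Claim_ definition above) =====
theorem matched_scope_tokens_py_spec : Claim_equal_matched_scope_tokens_py := by
  intro dts cts _
  unfold Spec_matched_scope_tokens_py
  rw [pvA_eq, pvB_eq]
  congr 1
  exact List.filter_congr fun t _ => pvPointwise (PySem.Set.ofList cts) t
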